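-- pv_equiv track=rewrite | github.com/X1-Il/ecpge | src/pages/Cours/Spe/Info/src/Pdfs/2-4 - TD - Partition équilibrée d'entiers positifs.py | PEEP_rec_mem
-- ===== SOURCE A (Python) =====
-- def PEEP_rec_mem(E):
--     def rec(i,j,E):
--         if (i,j) in dico:
--             return dico[(i,j)]
--         else:
--             if j==0:
--                 res = True
--             elif i==0: # Forcément, j n'est pas nul
--                 res = False
--             else:
--                 c1 = rec(i-1,j,E)
--                 e = E[i-1]
--                 c2 = (j >= e) and rec(i-1,j-e,E)
--                 res = (c1 or c2)
--             dico[(i,j)] = res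
--             return res
--     dico = {}
--     S,ni,nj = sum(E),len(E),len(E)//2
--     for i in range(ni+1):
--         for j in range(nj+1):
--             rec(i,j,E)
--     return dico
-- ===== SOURCE B (Python) =====
-- def PEEP_rec_mem(E):
--     # Iterative explicit-stack evaluator instead of memoized recursion.
--     S, ni, nj = sum(E), len(E), len(E) // 2
--     dico = {}
--     stack = [('eval', i, j) for i in range(ni, -1, -1) for j in range(nj, -1, -1)]
--     while stack:
--         tag, i, j = stack.pop()
--         if tag == 'eval':
--             if (i, j) in dico:
--                 continue
--             if j == 0:
--                 dico[(i, j)] = True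
--             elif i == 0:
--                 dico[(i, j)] = False
--             else:
--                 stack.append(('comb', i, j))
--                 e = E[i - 1]
--                 if j >= e:
--                     stack.append(('eval', i - 1, j - e))
--                 stack.append(('eval', i - 1, j))
--         else:
--             e = E[i - 1]
--             c1 = dico[(i - 1, j)]
--             c2 = (j >= e) and dico[(i - 1, j - e)]
--             dico[(i, j)] = c1 or c2
--     return dico
-- ===== Notes on version B (the rewrite author's own statement) =====
-- stated objective: alternative
-- what changed: The memoized recursion rec(i,j) is replaced by an iterative explicit-stack evaluator: a worklist of eval/combine frames processed in a single while loop fills the same memo dict (same keys, same booleans, same insertion order), with no recursion.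
import Mathlib
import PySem

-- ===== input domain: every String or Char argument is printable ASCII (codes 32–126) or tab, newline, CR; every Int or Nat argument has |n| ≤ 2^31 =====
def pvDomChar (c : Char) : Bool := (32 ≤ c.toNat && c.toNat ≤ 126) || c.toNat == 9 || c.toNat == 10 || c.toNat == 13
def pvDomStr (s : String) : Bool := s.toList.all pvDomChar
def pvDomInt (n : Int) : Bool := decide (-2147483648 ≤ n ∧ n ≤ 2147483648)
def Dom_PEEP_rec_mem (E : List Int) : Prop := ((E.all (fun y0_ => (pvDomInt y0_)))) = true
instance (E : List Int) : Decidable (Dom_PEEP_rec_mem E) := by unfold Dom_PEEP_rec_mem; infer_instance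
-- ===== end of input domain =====

-- B replaces the memoized recursion by an iterative explicit-stack evaluator over eval/combine
-- frames (same memo dict, identical key insertion order); objective: alternative, not faster.

-- ===== PORT A =====
-- rec(i,j,E) of the Python, threading the memo dict 'dico'.  The loop index i is a
-- nonnegative Python loop counter (range(ni+1)) and rec only ever recurses from i'+1
-- to i', so it is modelled as a Nat; dict keys are the Int pair (↑i, j).
-- E[i-1] is ported as pyGetD with default 0: the index i-1 = i' lies in [0, len E)
-- on every call this function makes, so the default is never used (exact here).
def pvRecA (E : List Int) (i : Nat) (j : Int) (d : PySem.Dict (Int × Int) Bool) :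
    Bool × PySem.Dict (Int × Int) Bool :=
  match d.get? (↑i, j) with
  | some b => (b, d)
  | none =>
    if j = 0 then (true, d.insert (↑i, j) true)
    else
      match i with
      | 0 => (false, d.insert (↑(0 : Nat), j) false)
      | i' + 1 =>
        let p1 := pvRecA E i' j d
        let e := PySem.List.pyGetD E (↑i') 0
        if j ≥ e then
          let p2 := pvRecA E i' (j - e) p1.2
          let res := p1.1 || p2.1
          (res, p2.2.insert (↑(i' + 1), j) res)
        else
          let res := p1.1 || false
          (res, p1.2.insert (↑(i' + 1), j) res)

-- driver: the two nested range loops (range(n) over nonnegative bounds = List.range n).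
-- The Python also computes S = sum(E) and never uses it; it is omitted here.
def PEEP_rec_mem (E : List Int) : List (Int × Int × Bool) :=
  let ni := E.length
  let nj := E.length / 2
  let d := (List.range (ni + 1)).foldl
    (fun d i => (List.range (nj + 1)).foldl (fun d j => (pvRecA E i (↑j) d).2) d)
    PySem.Dict.empty
  d.items.map (fun p => (p.1.1, p.1.2, p.2))

-- ===== PORT B =====
-- worklist frames of Source B: 'eval i j' = ensure (i,j) is memoized, 'comb i j' = combine
-- the two child values already in the memo.  The Lean list's head is the Python stack's
-- top (the Python pushes the initial tasks reversed and pops from the end).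
inductive PvFrame
  | eval : Nat → Int → PvFrame
  | comb : Nat → Int → PvFrame
deriving DecidableEq, Repr

-- termination measure for the machine: eval frames weigh 2·4^i, comb frames weigh 1
def pvW : PvFrame → Nat
  | .eval i _ => 2 * 4 ^ i
  | .comb _ _ => 1

def pvWs (st : List PvFrame) : Nat := (st.map pvW).sum

-- the while-loop of Source B.  comb frames are only ever pushed with i ≥ 1 and with both
-- child keys memoized, so the 'comb 0' arm and the getD defaults are never exercised
-- by the driver below (they mirror dico[...] lookups that cannot fail in the Python).
def pvRun (E : List Int) (st : List PvFrame) (d : PySem.Dict (Int × Int) Bool) :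
    PySem.Dict (Int × Int) Bool :=
  match st with
  | [] => d
  | .eval i j :: st' =>
    if (d.get? (↑i, j)).isSome then pvRun E st' d
    else if j = 0 then pvRun E st' (d.insert (↑i, j) true)
    else
      match i with
      | 0 => pvRun E st' (d.insert (↑(0 : Nat), j) false)
      | i' + 1 =>
        let e := PySem.List.pyGetD E (↑i') 0
        let kids := if j ≥ e then [PvFrame.eval i' j, PvFrame.eval i' (j - e)]
                    else [PvFrame.eval i' j]
        pvRun E (kids ++ PvFrame.comb (i' + 1) j :: st') d
  | .comb i j :: st' =>
    match i with
    | 0 => pvRun E st' d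
    | i' + 1 =>
      let e := PySem.List.pyGetD E (↑i') 0
      let c1 := d.getD (↑i', j) false
      let c2 := decide (j ≥ e) && d.getD (↑i', j - e) false
      pvRun E st' (d.insert (↑(i' + 1), j) (c1 || c2))
termination_by pvWs st
decreasing_by
  all_goals simp only [pvWs, pvW, List.map_cons, List.sum_cons]
  all_goals try omega
  all_goals first
    | (have h4 : 1 ≤ 4 ^ i := Nat.one_le_pow i 4 (by norm_num); omega)
    | (have h4 : 1 ≤ 4 ^ i' := Nat.one_le_pow i' 4 (by norm_num);
       split <;> simp [pvW, pow_succ] <;> omega)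

def PEEP_rec_mem_alt (E : List Int) : List (Int × Int × Bool) :=
  let ni := E.length
  let nj := E.length / 2
  let frames := (List.range (ni + 1)).flatMap
    (fun i => (List.range (nj + 1)).map (fun j => PvFrame.eval i (↑j)))
  (pvRun E frames PySem.Dict.empty).items.map (fun p => (p.1.1, p.1.2, p.2))

-- ===== PRECONDITION & SPEC =====
def Spec_PEEP_rec_mem (E : List Int) (out : List (Int × Int × Bool)) : Prop := out = PEEP_rec_mem_alt E
instance (E : List Int) (out : List (Int × Int × Bool)) : Decidable (Spec_PEEP_rec_mem E out) := by unfold Spec_PEEP_rec_mem; infer_instance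

-- ===== CLAIM (what is proved, stated in full; the proofs are below) =====
def Claim_equal_PEEP_rec_mem : Prop := ∀ (E : List Int), Dom_PEEP_rec_mem E → Spec_PEEP_rec_mem E (PEEP_rec_mem E)

-- ===== LEMMAS AND PROOFS =====

-- A's rec only adds bindings: existing bindings survive a call
theorem pvRecA_mono (E : List Int) (i : Nat) :
    ∀ (j : Int) (d : PySem.Dict (Int × Int) Bool) (k : Int × Int) (v : Bool),
      d.get? k = some v → ((pvRecA E i j d).2).get? k = some v := by
  induction i with
  | zero =>
    intro j d k v hv
    unfold pvRecA
    cases hd : d.get? (↑(0 : Nat), j) with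
    | some b => simpa [hd]
    | none =>
      have hk : k ≠ (↑(0 : Nat), j) := by rintro rfl; rw [hd] at hv; cases hv
      split_ifs <;> simp_all [PySem.Dict.get?_insert]
  | succ i' ih =>
    intro j d k v hv
    unfold pvRecA
    cases hd : d.get? (↑(i' + 1), j) with
    | some b => simpa [hd]
    | none =>
      have hk : k ≠ (↑(i' + 1), j) := by rintro rfl; rw [hd] at hv; cases hv
      by_cases hj : j = 0
      · simp_all [PySem.Dict.get?_insert]
      · by_cases hge : j ≥ PySem.List.pyGetD E (↑i') 0
        · simp only [hj, hge, if_true, if_false]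
          have h1 := ih j d k v hv
          have h2 := ih (j - PySem.List.pyGetD E (↑i') 0) (pvRecA E i' j d).2 k v h1
          simp_all [PySem.Dict.get?_insert]
        · simp only [hj, hge, if_false]
          have h1 := ih j d k v hv
          simp_all [PySem.Dict.get?_insert]

-- after A's rec, the key (i,j) is bound to the returned value
theorem pvRecA_self (E : List Int) (i : Nat) (j : Int) (d : PySem.Dict (Int × Int) Bool) :
    ((pvRecA E i j d).2).get? (↑i, j) = some (pvRecA E i j d).1 := by
  unfold pvRecA
  cases hd : d.get? (↑i, j) with
  | some b => simp [hd]
  | none =>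
    cases i with
    | zero => split_ifs <;> simp_all [PySem.Dict.get?_insert_self]
    | succ i' =>
      split_ifs <;> try simp_all [PySem.Dict.get?_insert_self]
      split <;> simp [PySem.Dict.get?_insert_self]

-- one eval frame of B's machine behaves exactly like one call of A's rec
theorem pvRun_eval (E : List Int) (i : Nat) :
    ∀ (j : Int) (st : List PvFrame) (d : PySem.Dict (Int × Int) Bool),
      pvRun E (PvFrame.eval i j :: st) d = pvRun E st (pvRecA E i j d).2 := by
  induction i with
  | zero =>
    intro j st d
    rw [pvRun]
    unfold pvRecA
    cases hd : d.get? (↑(0 : Nat), j) with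
    | some b => simp
    | none => split_ifs <;> simp_all

  | succ i' ih =>
    intro j st d
    rw [pvRun]
    cases hd : d.get? (↑(i' + 1), j) with
    | some b =>
      conv_rhs => unfold pvRecA
      push_cast at hd
      simp [hd]
    | none =>
      by_cases hj : j = 0
      · subst hj
        conv_rhs => unfold pvRecA
        push_cast at hd
        simp [hd]
      · simp only [Option.isSome_none, Bool.false_eq_true, if_false, hj]
        by_cases hge : j ≥ PySem.List.pyGetD E (↑i') 0
        · rw [if_pos hge]
          simp only [List.cons_append, List.nil_append]
          rw [ih, ih, pvRun]
          have h1 := pvRecA_self E i' j d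
          have h2 := pvRecA_self E i' (j - PySem.List.pyGetD E (↑i') 0) (pvRecA E i' j d).2
          have h1' := pvRecA_mono E i' (j - PySem.List.pyGetD E (↑i') 0) (pvRecA E i' j d).2 _ _ h1
          conv_rhs => unfold pvRecA
          simp_all [PySem.Dict.getD_eq_get?_getD]
        · have hF : ¬ ((E[i']?.getD 0 : Int) ≤ j) := by simpa using hge
          rw [if_neg hge]
          simp only [List.cons_append, List.nil_append]
          rw [ih, pvRun]
          have h1 := pvRecA_self E i' j d
          conv_rhs => unfold pvRecA
          push_cast at hd
          simp [hd, hj, hF, PySem.Dict.getD_eq_get?_getD, h1]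

-- a worklist of eval frames is the fold of A's rec over the same (i, j) pairs
theorem pvRun_evals (E : List Int) (l : List (Nat × Int)) :
    ∀ (d : PySem.Dict (Int × Int) Bool),
      pvRun E (l.map (fun p => PvFrame.eval p.1 p.2)) d
        = l.foldl (fun d p => (pvRecA E p.1 p.2 d).2) d := by
  induction l with
  | nil => intro d; rw [pvRun.eq_def]; rfl
  | cons p l ih => intro d; simp only [List.map_cons, List.foldl_cons, pvRun_eval, ih]

-- ===== VERDICT (by name: the statement is the Claim_ definition above) =====
theorem PEEP_rec_mem_spec : Claim_equal_PEEP_rec_mem := by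
  intro E _
  unfold Spec_PEEP_rec_mem PEEP_rec_mem PEEP_rec_mem_alt
  have hframes :
      (List.range (E.length + 1)).flatMap
          (fun i => (List.range (E.length / 2 + 1)).map (fun j => PvFrame.eval i (↑j)))
        = ((List.range (E.length + 1)).flatMap
            (fun i => (List.range (E.length / 2 + 1)).map (fun j => (i, (↑j : Int))))).map
            (fun p => PvFrame.eval p.1 p.2) := by
    simp [List.map_flatMap]
  simp only [hframes, pvRun_evals, List.foldl_flatMap, List.foldl_map]
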